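-- pv_equiv track=rewrite | github.com/EDN-Project/backend | iot_back.py | determine_plant_stage
-- ===== SOURCE A (Python) =====
-- def determine_plant_stage(days_passed):
--     # Define the growth stages with their durations
--     raw_stages = [
--         ("Seed Germination and Early Seedling", 7, 17),
--         ("Vegetative Growth", 30, 50),
--         ("Flowering", 20, 30),
--         ("Fruiting", 30, 45),
--         ("Harvesting", 10, 20),
--         ("Post-Harvest", 10, 20),
--     ]
--
--     # Calculate the timeline for each stage
--     stages_timeline = []
--     start_min = 0
--     start_max = 0
--
--     for name, min_duration, max_duration in raw_stages:
--         end_min = start_min + min_duration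
--         end_max = start_max + max_duration
--         stages_timeline.append((name, start_min, end_min, start_max, end_max))
--         start_min = end_min
--         start_max = end_max
--
--     # Determine current stage based on days passed
--     for name, min_start, min_end, max_start, max_end in stages_timeline:
--         if min_start <= days_passed <= min_end or max_start <= days_passed <= max_end:
--             return name
--
--     return None
-- ===== SOURCE B (Python) =====
-- # B: no linear scan over stages. Outside 0..182 the answer is None; inside, the
-- # first-matching stage index is the minimum of two binary searches over the
-- # sorted cumulative end boundaries (min-timeline ends and max-timeline ends).
-- STAGE_NAMES = [
--     "Seed Germination and Early Seedling",
--     "Vegetative Growth",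
--     "Flowering",
--     "Fruiting",
--     "Harvesting",
--     "Post-Harvest",
-- ]
-- ENDS_MIN = [7, 37, 57, 87, 97, 107]
-- ENDS_MAX = [17, 67, 97, 142, 162, 182]
--
-- def _bisect_left(arr, x):
--     lo, hi = 0, len(arr)
--     while lo < hi:
--         mid = (lo + hi) // 2
--         if arr[mid] < x:
--             lo = mid + 1
--         else:
--             hi = mid
--     return lo
--
-- def determine_plant_stage(days_passed):
--     if days_passed < 0 or days_passed > 182:
--         return None
--     i = _bisect_left(ENDS_MAX, days_passed)
--     if days_passed <= 107:
--         j = _bisect_left(ENDS_MIN, days_passed)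
--         if j < i:
--             i = j
--     return STAGE_NAMES[i]
-- ===== Notes on version B (the rewrite author's own statement) =====
-- stated objective: alternative
-- what changed: B replaces A's build-timeline-then-linearly-scan-stages approach with two binary searches over the sorted cumulative end-boundary arrays, taking the smaller index (the first-match rule), after a constant range test.
import Mathlib
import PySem

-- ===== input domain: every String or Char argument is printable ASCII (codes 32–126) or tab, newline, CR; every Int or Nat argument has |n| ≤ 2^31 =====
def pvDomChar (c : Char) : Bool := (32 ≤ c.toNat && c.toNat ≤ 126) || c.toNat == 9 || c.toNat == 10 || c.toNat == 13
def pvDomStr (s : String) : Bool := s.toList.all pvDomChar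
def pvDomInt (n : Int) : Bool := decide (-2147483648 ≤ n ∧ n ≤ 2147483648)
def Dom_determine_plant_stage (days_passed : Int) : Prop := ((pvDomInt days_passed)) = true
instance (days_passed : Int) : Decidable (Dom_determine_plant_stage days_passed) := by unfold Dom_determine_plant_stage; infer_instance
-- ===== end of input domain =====

-- B replaces A's build-timeline-then-linear-scan with two binary searches over the
-- sorted cumulative end boundaries, taking the smaller index (first-match rule).

-- ===== PORT A =====
-- scan of the computed timeline: first stage whose min- or max-interval contains days_passed
def pvScanA (days_passed : Int) : List (String × Int × Int × Int × Int) → Option String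
  | [] => none
  | (name, min_start, min_end, max_start, max_end) :: rest =>
      if (min_start ≤ days_passed ∧ days_passed ≤ min_end) ∨
         (max_start ≤ days_passed ∧ days_passed ≤ max_end) then some name
      else pvScanA days_passed rest

def determine_plant_stage (days_passed : Int) : Option String :=
  let raw_stages : List (String × Int × Int) := [
    ("Seed Germination and Early Seedling", 7, 17),
    ("Vegetative Growth", 30, 50),
    ("Flowering", 20, 30),
    ("Fruiting", 30, 45),
    ("Harvesting", 10, 20),
    ("Post-Harvest", 10, 20)]
  -- build stages_timeline with running start_min / start_max, as A does
  let st := raw_stages.foldl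
    (fun (acc : List (String × Int × Int × Int × Int) × Int × Int) x =>
      let (timeline, start_min, start_max) := acc
      let end_min := start_min + x.2.1
      let end_max := start_max + x.2.2
      (timeline ++ [(x.1, start_min, end_min, start_max, end_max)], end_min, end_max))
    ([], 0, 0)
  pvScanA days_passed st.1

-- ===== PORT B =====
def pvStageNames : List String := [
  "Seed Germination and Early Seedling",
  "Vegetative Growth",
  "Flowering",
  "Fruiting",
  "Harvesting",
  "Post-Harvest"]

def pvEndsMin : List Int := [7, 37, 57, 87, 97, 107]
def pvEndsMax : List Int := [17, 67, 97, 142, 162, 182]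

-- _bisect_left's while-loop (lo,hi stay in 0..len, so Nat arithmetic is exact here);
-- the fuel argument only bounds the iteration count (hi-lo shrinks each step, so
-- fuel = hi-lo always suffices) and never changes the computed value
def pvBisectLeft (arr : List Int) (x : Int) : Nat → Nat → Nat → Nat
  | 0, lo, _ => lo
  | fuel + 1, lo, hi =>
    if lo < hi then
      let mid := (lo + hi) / 2
      if arr.getD mid 0 < x then pvBisectLeft arr x fuel (mid + 1) hi
      else pvBisectLeft arr x fuel lo mid
    else lo

def determine_plant_stage_alt (days_passed : Int) : Option String :=
  if days_passed < 0 ∨ 182 < days_passed then none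
  else
    let i := pvBisectLeft pvEndsMax days_passed 6 0 6
    let i :=
      if days_passed ≤ 107 then
        let j := pvBisectLeft pvEndsMin days_passed 6 0 6
        if j < i then j else i
      else i
    -- i is provably < 6, so this indexing never hits the default
    some (pvStageNames.getD i "")

-- ===== PRECONDITION & SPEC =====
def Spec_determine_plant_stage (days_passed : Int) (out : Option String) : Prop := out = determine_plant_stage_alt days_passed
instance (days_passed : Int) (out : Option String) : Decidable (Spec_determine_plant_stage days_passed out) := by unfold Spec_determine_plant_stage; infer_instance

-- ===== CLAIM (what is proved, stated in full; the proofs are below) =====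
def Claim_equal_determine_plant_stage : Prop := ∀ (days_passed : Int), Dom_determine_plant_stage days_passed → Spec_determine_plant_stage days_passed (determine_plant_stage days_passed)

-- ===== LEMMAS AND PROOFS =====

lemma pvA_unfold (d : Int) :
    determine_plant_stage d = pvScanA d [
      ("Seed Germination and Early Seedling", 0, 7, 0, 17),
      ("Vegetative Growth", 7, 37, 17, 67),
      ("Flowering", 37, 57, 67, 97),
      ("Fruiting", 57, 87, 97, 142),
      ("Harvesting", 87, 97, 142, 162),
      ("Post-Harvest", 97, 107, 162, 182)] := by
  simp only [determine_plant_stage, List.foldl]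
  norm_num

theorem determine_plant_stage_spec : Claim_equal_determine_plant_stage := by
  intro d _
  unfold Spec_determine_plant_stage
  rw [pvA_unfold]
  by_cases h : 0 ≤ d ∧ d ≤ 182
  · obtain ⟨h0, h1⟩ := h
    interval_cases d <;> decide
  · have hd : d < 0 ∨ 182 < d := by omega
    simp only [pvScanA, determine_plant_stage_alt, if_pos hd]
    rcases hd with hd | hd <;> split_ifs <;> first | rfl | omega

-- ===== VERDICT (by name: the statement is the Claim_ definition above) =====
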